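-- pv_equiv track=rewrite | github.com/Sandovl0593/multi_cycle_proj | asm_parser.py | rot_format
-- ===== SOURCE A (Python) =====
-- def ror(value, shift):
--     """Rotate right 32-bit"""
--     shift %= 32
--     return ((value >> shift) | (value << (32 - shift))) & 0xFFFFFFFF
--
-- def rot_format(val):
--     uimm = val & 0xFFFFFFFF
--     # Caso simple: cabe en 8 bits
--     if uimm <= 0xFF:
--         return uimm
--
--     # Intentamos cada rotación posible
--     for rot in range(16):
--         # Para que imm = ROR(imm8, rot*2), inmovilizamos:
--         #   imm8 = ROL(imm, rot*2) & 0xFF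
--         sh = (rot * 2) % 32
--         imm8 = ((uimm << sh) | (uimm >> (32 - sh))) & 0xFF
--
--         # Comprobamos que reconstruye idéntico
--         if ror(imm8, sh) == uimm:
--             return (rot << 8) | imm8
--     raise ValueError(f"Valor inmediato no convertible a formato rotado: {val:#010x}")
-- ===== SOURCE B (Python) =====
-- def _ctz(x):
--     """Index of the lowest set bit of x (x > 0)."""
--     n = 0
--     while x & 1 == 0:
--         x >>= 1
--         n += 1
--     return n
--
-- def rot_format(val):
--     uimm = val & 0xFFFFFFFF
--     if uimm <= 0xFF:
--         return uimm
--     # A convertible value keeps its 8 significant bits either contiguous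
--     # (window anchored at the lowest set bit, rounded down to even) or split
--     # around bit 31 (window anchored at the lowest set bit above the low byte).
--     r = _ctz(uimm)
--     r -= r & 1
--     imm8 = uimm >> r
--     if imm8 > 0xFF:
--         r = 8 + _ctz(uimm >> 8)
--         r -= r & 1
--         imm8 = ((uimm >> r) | (uimm << (32 - r))) & 0xFFFFFFFF
--     if imm8 <= 0xFF:
--         return ((16 - r // 2) << 8) | imm8
--     raise ValueError(f"Valor inmediato no convertible a formato rotado: {val:#010x}")
-- ===== Notes on version B (the rewrite author's own statement) =====
-- stated objective: faster
-- what changed: Replaces A's exhaustive search over all 16 rotations (each rebuilding and verifying a candidate) by a direct bit-alignment computation: the window start is derived from the lowest set bit (contiguous cluster) or the lowest set bit above the low byte (cluster wrapped around bit 31), with one verification; the raising behaviour and message are identical.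
import Mathlib
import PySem

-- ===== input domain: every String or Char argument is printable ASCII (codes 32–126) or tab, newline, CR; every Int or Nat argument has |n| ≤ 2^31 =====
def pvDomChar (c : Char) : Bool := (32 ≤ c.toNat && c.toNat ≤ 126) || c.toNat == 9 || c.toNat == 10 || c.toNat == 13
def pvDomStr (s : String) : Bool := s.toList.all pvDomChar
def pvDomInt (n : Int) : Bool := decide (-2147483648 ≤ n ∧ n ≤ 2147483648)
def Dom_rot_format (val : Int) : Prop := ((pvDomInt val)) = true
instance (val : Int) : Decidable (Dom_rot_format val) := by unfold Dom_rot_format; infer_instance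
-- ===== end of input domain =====

-- B replaces A's 16-rotation search by a direct bit-alignment computation (two candidate
-- windows derived from lowest set bits, one verification); measurably faster by constant factor.

-- ===== PORT A =====
-- helper `ror` of Source A; the shift amounts are nonnegative wherever called, so `.toNat` is exact
def pyRor (value shift : Int) : Int :=
  let shift := PySem.Int.mod shift 32
  PySem.Int.band (PySem.Int.bor (value >>> shift.toNat) (value <<< ((32 : Int) - shift).toNat)) 0xFFFFFFFF

-- the `for rot in range(16)` loop with its early `return`; [] = loop exhausted,
-- where Python raises ValueError (excluded by Pre_rot_format; the 0 is never the claimed value)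
def rotLoopA (uimm : Int) : List Int → Int
  | [] => 0
  | rot :: rest =>
    let sh := PySem.Int.mod (rot * 2) 32
    let imm8 := PySem.Int.band (PySem.Int.bor (uimm <<< sh.toNat) (uimm >>> ((32 : Int) - sh).toNat)) 0xFF
    if pyRor imm8 sh = uimm then PySem.Int.bor (rot <<< (8 : Nat)) imm8
    else rotLoopA uimm rest

def rot_format (val : Int) : Int :=
  let uimm := PySem.Int.band val 0xFFFFFFFF
  if uimm ≤ 0xFF then uimm
  else rotLoopA uimm (PySem.List.pyRange 0 16 1)

-- ===== PORT B =====
-- `_ctz` of Source B: `while x & 1 == 0: x >>= 1; n += 1`; the fuel 64 only makes the loop total,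
-- it is never exhausted on the values _ctz is applied to (positive x)
def ctzGo : Nat → Int → Int → Int
  | 0, _, n => n
  | fuel + 1, x, n => if PySem.Int.band x 1 = 0 then ctzGo fuel (x >>> (1 : Nat)) (n + 1) else n

def ctz (x : Int) : Int := ctzGo 64 x 0

def rot_format_alt (val : Int) : Int :=
  let uimm := PySem.Int.band val 0xFFFFFFFF
  if uimm ≤ 0xFF then uimm
  else
    let r1 := ctz uimm - PySem.Int.band (ctz uimm) 1
    let imm8a := uimm >>> r1.toNat
    let ri :=
      if 0xFF < imm8a then
        let r2 := 8 + ctz (uimm >>> (8 : Nat))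
        let r3 := r2 - PySem.Int.band r2 1
        (r3, PySem.Int.band (PySem.Int.bor (uimm >>> r3.toNat) (uimm <<< ((32 : Int) - r3).toNat)) 0xFFFFFFFF)
      else (r1, imm8a)
    if ri.2 ≤ 0xFF then PySem.Int.bor ((16 - PySem.Int.floordiv ri.1 2) <<< (8 : Nat)) ri.2
    else 0  -- Python: raise ValueError (excluded by Pre_rot_format)

-- ===== PRECONDITION & SPEC =====
-- genN m s = the 32-bit value `m rotated right by s bits` (for m < 2^8 ≤ 2^s ... well-formed below)
def genN (m s : Nat) : Nat := m / 2 ^ s + m % 2 ^ s * 2 ^ (32 - s)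

-- Pre_: exactly the inputs A converts without raising ValueError: the low 32 bits of val are
-- an 8-bit constant rotated right by an even amount (the ARM rotated-immediate domain)
def Pre_rot_format (val : Int) : Prop :=
  ∃ m ∈ Finset.range 256, ∃ s ∈ Finset.range 16,
    PySem.Int.band val 0xFFFFFFFF = ((genN m (2 * s) : Nat) : Int)
instance (val : Int) : Decidable (Pre_rot_format val) := by unfold Pre_rot_format; infer_instance

def pvWitness_rot_format : Int := 1073741824

def Spec_rot_format (val : Int) (out : Int) : Prop := out = rot_format_alt val
instance (val : Int) (out : Int) : Decidable (Spec_rot_format val out) := by unfold Spec_rot_format; infer_instance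

-- ===== CLAIM (what is proved, stated in full; the proofs are below) =====
def Claim_equal_rot_format : Prop := ∀ (val : Int), Dom_rot_format val → Pre_rot_format val → Spec_rot_format val (rot_format val)

-- ===== LEMMAS AND PROOFS =====

-- Nat-level mirrors of the two port bodies (applied to the already-masked value);
-- these exist so that the finite check below reduces over Nat, and are tied to the
-- ports by the `..._eq_nat...` lemmas.
def natRor (value shift : Nat) : Nat :=
  ((value >>> (shift % 32)) ||| (value <<< (32 - shift % 32))) &&& 0xFFFFFFFF

def natLoopA (u : Nat) : List Nat → Nat
  | [] => 0
  | rot :: rest =>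
    let sh := rot * 2 % 32
    let imm8 := ((u <<< sh) ||| (u >>> (32 - sh))) &&& 0xFF
    if natRor imm8 sh = u then (rot <<< 8) ||| imm8
    else natLoopA u rest

def natA (u : Nat) : Nat :=
  if u ≤ 0xFF then u
  else natLoopA u [0, 1, 2, 3, 4, 5, 6, 7, 8, 9, 10, 11, 12, 13, 14, 15]

def natCtzGo : Nat → Nat → Nat → Nat
  | 0, _, n => n
  | fuel + 1, x, n => if x &&& 1 = 0 then natCtzGo fuel (x >>> 1) (n + 1) else n

def natCtz (x : Nat) : Nat := natCtzGo 64 x 0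

def natB (u : Nat) : Nat :=
  if u ≤ 0xFF then u
  else
    let r1 := natCtz u - (natCtz u &&& 1)
    let imm8a := u >>> r1
    let ri :=
      if 0xFF < imm8a then
        let r2 := 8 + natCtz (u >>> 8)
        let r3 := r2 - (r2 &&& 1)
        (r3, ((u >>> r3) ||| (u <<< (32 - r3))) &&& 0xFFFFFFFF)
      else (r1, imm8a)
    if ri.2 ≤ 0xFF then ((16 - ri.1 / 2) <<< 8) ||| ri.2
    else 0

-- the finite check: A's mirror = B's mirror on every representable rotated immediate
def chkS (s : Nat) : Nat → Bool
  | 0 => true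
  | n + 1 => (natA (genN n (2 * s)) == natB (genN n (2 * s))) && chkS s n

def chkAll : Nat → Bool
  | 0 => true
  | s + 1 => chkS s 256 && chkAll s

set_option maxRecDepth 3000000 in
set_option maxHeartbeats 16000000 in
theorem chkAll_true : chkAll 16 = true := by decide

theorem chkS_spec (s : Nat) : ∀ n, chkS s n = true → ∀ m, m < n → natA (genN m (2 * s)) = natB (genN m (2 * s)) := by
  intro n
  induction n with
  | zero => intro _ m hm; omega
  | succ k ih =>
    intro h m hm
    rw [chkS, Bool.and_eq_true, beq_iff_eq] at h
    rcases Nat.lt_succ_iff_lt_or_eq.mp hm with h' | h'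
    · exact ih h.2 m h'
    · subst h'; exact h.1

theorem chkAll_spec : ∀ k, chkAll k = true → ∀ s, s < k → chkS s 256 = true := by
  intro k
  induction k with
  | zero => intro _ s hs; omega
  | succ j ih =>
    intro h s hs
    rw [chkAll, Bool.and_eq_true] at h
    rcases Nat.lt_succ_iff_lt_or_eq.mp hs with h' | h'
    · exact ih h.2 s h'
    · subst h'; exact h.1

theorem key (m s : Nat) (hm : m < 256) (hs : s < 16) : natA (genN m (2 * s)) = natB (genN m (2 * s)) :=
  chkS_spec s 256 (chkAll_spec 16 chkAll_true s hs) m hm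

-- cast bridges
theorem natCast_shiftLeft (a k : Nat) : ((a : Int) <<< k) = ((a <<< k : Nat) : Int) := rfl

theorem natCast_shiftRight (a k : Nat) : ((a : Int) >>> k) = ((a >>> k : Nat) : Int) := rfl

theorem pyRor_natCast (a b : Nat) : pyRor (a : Int) (b : Int) = ((natRor a b : Nat) : Int) := by
  unfold pyRor natRor
  simp only []
  rw [show PySem.Int.mod (b : Int) 32 = ((b % 32 : Nat) : Int) from PySem.Int.mod_natCast b 32]
  rw [Int.toNat_natCast]
  rw [show (32 : Int) - ((b % 32 : Nat) : Int) = ((32 - b % 32 : Nat) : Int) from by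
    have h := Nat.mod_lt b (show 0 < 32 by norm_num)
    omega]
  rw [Int.toNat_natCast, natCast_shiftLeft, natCast_shiftRight]
  rw [show PySem.Int.bor ((a >>> (b % 32) : Nat) : Int) ((a <<< (32 - b % 32) : Nat) : Int)
      = (((a >>> (b % 32)) ||| (a <<< (32 - b % 32)) : Nat) : Int) from PySem.Int.bor_natCast _ _]
  exact PySem.Int.band_natCast _ 0xFFFFFFFF
theorem rotLoopA_natCast (u : Nat) (rots : List Nat) :
    rotLoopA (u : Int) (rots.map (Nat.cast)) = ((natLoopA u rots : Nat) : Int) := by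
  induction rots with
  | nil => rfl
  | cons rot rest ih =>
    rw [List.map_cons]
    simp only [rotLoopA, natLoopA]
    rw [show ((rot : Int) * 2) = ((rot * 2 : Nat) : Int) from by push_cast; ring]
    rw [show PySem.Int.mod ((rot * 2 : Nat) : Int) 32 = ((rot * 2 % 32 : Nat) : Int) from PySem.Int.mod_natCast _ 32]
    rw [Int.toNat_natCast]
    rw [show (32 : Int) - ((rot * 2 % 32 : Nat) : Int) = ((32 - rot * 2 % 32 : Nat) : Int) from by
      have h := Nat.mod_lt (rot * 2) (show 0 < 32 by norm_num)
      omega]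
    rw [Int.toNat_natCast, natCast_shiftLeft, natCast_shiftRight]
    rw [show PySem.Int.bor ((u <<< (rot * 2 % 32) : Nat) : Int) ((u >>> (32 - rot * 2 % 32) : Nat) : Int)
        = (((u <<< (rot * 2 % 32)) ||| (u >>> (32 - rot * 2 % 32)) : Nat) : Int) from PySem.Int.bor_natCast _ _]
    rw [show PySem.Int.band (((u <<< (rot * 2 % 32)) ||| (u >>> (32 - rot * 2 % 32)) : Nat) : Int) 0xFF
        = ((((u <<< (rot * 2 % 32)) ||| (u >>> (32 - rot * 2 % 32))) &&& 0xFF : Nat) : Int) from PySem.Int.band_natCast _ 0xFF]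
    rw [pyRor_natCast]
    rw [apply_ite (fun (n : Nat) => (n : Int))]
    split_ifs with h1 h2 h3
    · rw [natCast_shiftLeft]; exact PySem.Int.bor_natCast _ _
    · exact absurd (by exact_mod_cast h1) h2
    · exact absurd (by exact_mod_cast h3) h1
    · exact ih
theorem rot_format_eq_natA (val : Int) (g : Nat) (h : PySem.Int.band val 0xFFFFFFFF = (g : Int)) :
    rot_format val = ((natA g : Nat) : Int) := by
  unfold rot_format natA
  rw [h]
  by_cases hg : g ≤ 0xFF
  · rw [if_pos (by exact_mod_cast hg), if_pos hg]
  · rw [if_neg (by exact_mod_cast hg), if_neg hg]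
    rw [show PySem.List.pyRange 0 16 1 = ([0, 1, 2, 3, 4, 5, 6, 7, 8, 9, 10, 11, 12, 13, 14, 15] : List Nat).map (Nat.cast) from by decide]
    exact rotLoopA_natCast g _

theorem ctz_natCast (x : Nat) : ctz (x : Int) = ((natCtz x : Nat) : Int) := by
  unfold ctz natCtz
  have main : ∀ fuel (y n : Nat), ctzGo fuel (y : Int) (n : Int) = ((natCtzGo fuel y n : Nat) : Int) := by
    intro fuel
    induction fuel with
    | zero => intro y n; rfl
    | succ f ih =>
      intro y n
      simp only [ctzGo, natCtzGo]
      rw [show PySem.Int.band (y : Int) 1 = ((y &&& 1 : Nat) : Int) from PySem.Int.band_natCast y 1]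
      rw [natCast_shiftRight]
      rw [show ((n : Int) + 1) = ((n + 1 : Nat) : Int) from by push_cast; ring]
      rw [apply_ite (fun (k : Nat) => (k : Int))]
      split_ifs with h1 h2 h3
      · exact ih _ _
      · exact absurd (by exact_mod_cast h1) h2
      · exact absurd (by exact_mod_cast h3) h1
      · rfl
  exact main 64 x 0
theorem natCtzGo_le (fuel : Nat) : ∀ x n k, x ≠ 0 → x < 2 ^ k → natCtzGo fuel x n ≤ n + k := by
  induction fuel with
  | zero => intro x n k _ _; rw [natCtzGo]; omega
  | succ f ih =>
    intro x n k hx hk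
    rw [natCtzGo]
    split
    · next h =>
      have hx2 : x % 2 = 0 := by rw [← Nat.and_one_is_mod]; exact h
      have hsh : x >>> 1 = x / 2 := Nat.shiftRight_one x
      rcases k with _ | k'
      · omega
      · have hpow : 2 ^ (k' + 1) = 2 * 2 ^ k' := by ring
        have h1 : x / 2 ≠ 0 := by omega
        have h2 : x / 2 < 2 ^ k' := by omega
        have := ih (x >>> 1) (n + 1) k' (by rwa [hsh]) (by rwa [hsh])
        omega
    · omega

theorem natCtz_le (x k : Nat) (hx : x ≠ 0) (hk : x < 2 ^ k) : natCtz x ≤ k := by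
  have := natCtzGo_le 64 x 0 k hx hk
  unfold natCtz
  omega

theorem rot_format_alt_eq_natB (val : Int) (g : Nat) (hlt : g < 2 ^ 32)
    (h : PySem.Int.band val 0xFFFFFFFF = (g : Int)) :
    rot_format_alt val = ((natB g : Nat) : Int) := by
  unfold rot_format_alt natB
  rw [h]
  by_cases hg : g ≤ 0xFF
  · rw [if_pos (show ((g : Nat) : Int) ≤ (0xFF : Int) from by exact_mod_cast hg), if_pos hg]
  · rw [if_neg (show ¬ ((g : Nat) : Int) ≤ (0xFF : Int) from by exact_mod_cast hg), if_neg hg]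
    simp only []
    have hg0 : g ≠ 0 := by omega
    have hctz : natCtz g ≤ 32 := natCtz_le g 32 hg0 hlt
    have hand1 : natCtz g &&& 1 ≤ natCtz g := Nat.and_le_left
    have hsh8 : g >>> 8 = g / 2 ^ 8 := Nat.shiftRight_eq_div_pow g 8
    have hne : g >>> 8 ≠ 0 := by
      have := Nat.div_pos (show 2 ^ 8 ≤ g by omega) (show 0 < 2 ^ 8 by norm_num)
      omega
    have hlt24 : g >>> 8 < 2 ^ 24 := by rw [hsh8]; omega
    have hctz8 : natCtz (g >>> 8) ≤ 24 := natCtz_le _ 24 hne hlt24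
    have hand2 : (8 + natCtz (g >>> 8)) &&& 1 ≤ 8 + natCtz (g >>> 8) := Nat.and_le_left
    rw [ctz_natCast]
    rw [show PySem.Int.band ((natCtz g : Nat) : Int) 1 = ((natCtz g &&& 1 : Nat) : Int) from PySem.Int.band_natCast _ 1]
    rw [show ((natCtz g : Nat) : Int) - ((natCtz g &&& 1 : Nat) : Int) = ((natCtz g - (natCtz g &&& 1) : Nat) : Int) from by omega]
    simp only [Int.toNat_natCast]
    simp only [natCast_shiftRight]
    rw [ctz_natCast]
    rw [show (8 : Int) + ((natCtz (g >>> 8) : Nat) : Int) = ((8 + natCtz (g >>> 8) : Nat) : Int) from by push_cast; ring]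
    rw [show PySem.Int.band ((8 + natCtz (g >>> 8) : Nat) : Int) 1 = (((8 + natCtz (g >>> 8)) &&& 1 : Nat) : Int) from PySem.Int.band_natCast _ 1]
    rw [show ((8 + natCtz (g >>> 8) : Nat) : Int) - (((8 + natCtz (g >>> 8)) &&& 1 : Nat) : Int)
        = ((8 + natCtz (g >>> 8) - ((8 + natCtz (g >>> 8)) &&& 1) : Nat) : Int) from by omega]
    simp only [Int.toNat_natCast]
    rw [show (32 : Int) - ((8 + natCtz (g >>> 8) - ((8 + natCtz (g >>> 8)) &&& 1) : Nat) : Int)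
        = ((32 - (8 + natCtz (g >>> 8) - ((8 + natCtz (g >>> 8)) &&& 1)) : Nat) : Int) from by omega]
    simp only [Int.toNat_natCast, natCast_shiftLeft]
    set c0 : Nat := natCtz g - (natCtz g &&& 1) with hc0
    set r3 : Nat := 8 + natCtz (g >>> 8) - ((8 + natCtz (g >>> 8)) &&& 1) with hr3
    have hr3b : r3 ≤ 32 := by omega
    rw [show PySem.Int.bor ((g >>> r3 : Nat) : Int) ((g <<< (32 - r3) : Nat) : Int)
        = (((g >>> r3) ||| (g <<< (32 - r3)) : Nat) : Int) from PySem.Int.bor_natCast _ _]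
    rw [show PySem.Int.band (((g >>> r3) ||| (g <<< (32 - r3)) : Nat) : Int) 0xFFFFFFFF
        = ((((g >>> r3) ||| (g <<< (32 - r3))) &&& 0xFFFFFFFF : Nat) : Int) from PySem.Int.band_natCast _ 0xFFFFFFFF]
    by_cases hc : (0xFF : Nat) < g >>> c0
    · rw [if_pos (show (0xFF : Int) < ((g >>> c0 : Nat) : Int) from by exact_mod_cast hc), if_pos hc]
      simp only []
      by_cases hf : ((g >>> r3) ||| (g <<< (32 - r3))) &&& 0xFFFFFFFF ≤ 0xFF
      · rw [if_pos (show ((((g >>> r3) ||| (g <<< (32 - r3))) &&& 0xFFFFFFFF : Nat) : Int) ≤ (0xFF : Int) from by exact_mod_cast hf),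
          if_pos hf]
        rw [show PySem.Int.floordiv ((r3 : Nat) : Int) 2 = ((r3 / 2 : Nat) : Int) from PySem.Int.floordiv_natCast _ 2]
        rw [show (16 : Int) - ((r3 / 2 : Nat) : Int) = ((16 - r3 / 2 : Nat) : Int) from by
          have : r3 / 2 ≤ 16 := by omega
          omega]
        rw [natCast_shiftLeft]
        exact PySem.Int.bor_natCast _ _
      · rw [if_neg (show ¬ ((((g >>> r3) ||| (g <<< (32 - r3))) &&& 0xFFFFFFFF : Nat) : Int) ≤ (0xFF : Int) from by exact_mod_cast hf),
          if_neg hf]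
        rfl
    · rw [if_neg (show ¬ (0xFF : Int) < ((g >>> c0 : Nat) : Int) from by exact_mod_cast hc), if_neg hc]
      simp only []
      by_cases hf : g >>> c0 ≤ 0xFF
      · rw [if_pos (show ((g >>> c0 : Nat) : Int) ≤ (0xFF : Int) from by exact_mod_cast hf), if_pos hf]
        rw [show PySem.Int.floordiv ((c0 : Nat) : Int) 2 = ((c0 / 2 : Nat) : Int) from PySem.Int.floordiv_natCast _ 2]
        rw [show (16 : Int) - ((c0 / 2 : Nat) : Int) = ((16 - c0 / 2 : Nat) : Int) from by
          have h1 : c0 ≤ 32 := by omega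
          have : c0 / 2 ≤ 16 := by omega
          omega]
        rw [natCast_shiftLeft]
        exact PySem.Int.bor_natCast _ _
      · rw [if_neg (show ¬ ((g >>> c0 : Nat) : Int) ≤ (0xFF : Int) from by exact_mod_cast hf), if_neg hf]
        rfl
theorem genN_lt (m s : Nat) (hm : m < 256) (hs : s < 16) : genN m (2 * s) < 2 ^ 32 := by
  unfold genN
  rcases Nat.lt_or_ge (2 * s) 8 with h | h
  · interval_cases s <;> simp_all <;> omega
  · have h0 : m / 2 ^ (2 * s) = 0 := Nat.div_eq_of_lt (by
      calc m < 256 := hm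
        _ ≤ 2 ^ (2 * s) := by exact Nat.pow_le_pow_right (by norm_num) h |>.trans_eq' (by norm_num))
    have h1 : m % 2 ^ (2 * s) ≤ m := Nat.mod_le _ _
    have h2 : 2 ^ (32 - 2 * s) ≤ 2 ^ 24 := Nat.pow_le_pow_right (by norm_num) (by omega)
    calc m / 2 ^ (2 * s) + m % 2 ^ (2 * s) * 2 ^ (32 - 2 * s)
        ≤ 0 + 255 * 2 ^ 24 := by
          have := Nat.mul_le_mul (by omega : m % 2 ^ (2 * s) ≤ 255) h2
          omega
      _ < 2 ^ 32 := by norm_num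

-- ===== VERDICT (by name: the statement is the Claim_ definition above) =====
theorem rot_format_spec : Claim_equal_rot_format := by
  intro val _ hPre
  unfold Spec_rot_format
  obtain ⟨m, hm, s, hs, hEq⟩ := hPre
  rw [Finset.mem_range] at hm hs
  rw [rot_format_eq_natA val _ hEq, rot_format_alt_eq_natB val _ (genN_lt m s hm hs) hEq,
    key m s hm hs]
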